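-- pv_equiv track=rewrite | github.com/dfki-ric-quantum/hyperlax-quantum | hyperlax/logger/hp_progress_bar.py | _generate_progress_bar
-- ===== SOURCE A (Python) =====
-- def _generate_progress_bar(
--     percentage,  # current progress percentage for this HP
--     length=20,
--     char="=",
--     tip_char_normal=">",
--     tip_char_overshoot="*",  # For when current_steps > current_target_milestone_value
--     unfill_char=".",
--     milestone_char_future="|",
--     milestone_char_passed="+",
--     milestone_char_current_target_overshot="!",  # If current_steps > current_target_milestone_value
--     all_milestone_bar_indices: list[int] | None = None,  # char indices for ALL milestones
--     current_target_milestone_bar_idx: int = -1,  # char idx of the current HP's target milestone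
--     is_generally_overshooting_current_target: bool = False,  # For the tip character
-- ):
--     percentage = max(0, min(100, percentage))
--     # How many characters are filled based on the HP's current progress percentage
--     filled_progress_length = int(length * percentage / 100)
--
--     bar_list = [unfill_char] * length
--
--     # Fill the bar with the main progress character
--     for i in range(filled_progress_length):
--         if i < length:
--             bar_list[i] = char
--
--     # Determine and place the tip character
--     tip_to_use = (
--         tip_char_overshoot if is_generally_overshooting_current_target else tip_char_normal
--     )
--     tip_pos = -1
--
--     if 0 <= filled_progress_length < length:  # Tip is applicable if bar is not full
--         bar_list[filled_progress_length] = tip_to_use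
--         tip_pos = filled_progress_length
--     elif filled_progress_length == length and length > 0:  # Bar is full
--         if (
--             is_generally_overshooting_current_target
--         ):  # If full AND overshooting current eval target
--             # Overwrite last char with overshoot tip only if it's genuinely overshooting.
--             # If it's just full and completed, no special tip needed unless specified.
--             bar_list[length - 1] = tip_to_use
--             tip_pos = length - 1
--         # Otherwise (full but not overshooting its *current* target, or completed),
--         # the bar is just full of `char`.
--
--     # Overlay milestone markers
--     if all_milestone_bar_indices:
--         for m_bar_idx in all_milestone_bar_indices:
--             if 0 <= m_bar_idx < length:
--                 chosen_milestone_char = milestone_char_future  # Default to future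
--
--                 if m_bar_idx == current_target_milestone_bar_idx:
--                     # This is the specific milestone this HP is currently aiming for.
--                     # Has the progress (filled_length) passed this milestone's position on the bar?
--                     if filled_progress_length > m_bar_idx:
--                         chosen_milestone_char = milestone_char_current_target_overshot
--                     # else, it's the current target, but progress hasn't reached its bar position yet.
--                     # It will remain `milestone_char_future` unless `filled_progress_length == m_bar_idx`,
--                     # in which case the tip might overwrite it.
--                 elif filled_progress_length > m_bar_idx:
--                     # Progress has definitely passed this non-target milestone's position.
--                     chosen_milestone_char = milestone_char_passed
--                 # Otherwise, it's a future milestone not yet reached and not the current target.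
--
--                 # Place the chosen milestone char, ensuring tip takes precedence
--                 if m_bar_idx == tip_pos:
--                     pass  # Tip (normal or general overshoot) takes precedence
--                 else:
--                     bar_list[m_bar_idx] = chosen_milestone_char
--
--     bar_str = "".join(bar_list)
--     return f"[{bar_str}]"
-- ===== SOURCE B (Python) =====
-- def _generate_progress_bar(
--     percentage,
--     length=20,
--     char="=",
--     tip_char_normal=">",
--     tip_char_overshoot="*",
--     unfill_char=".",
--     milestone_char_future="|",
--     milestone_char_passed="+",
--     milestone_char_current_target_overshot="!",
--     all_milestone_bar_indices: "list[int] | None" = None,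
--     current_target_milestone_bar_idx: int = -1,
--     is_generally_overshooting_current_target: bool = False,
-- ):
--     percentage = max(0, min(100, percentage))
--     filled = int(length * percentage / 100)
--
--     # specials: position -> the single character shown there instead of the base fill.
--     # Milestones first, then the tip, which overwrites (tip precedence).
--     specials = {}
--     for m in (all_milestone_bar_indices or []):
--         if 0 <= m < length:
--             if m == current_target_milestone_bar_idx:
--                 specials[m] = (
--                     milestone_char_current_target_overshot
--                     if filled > m
--                     else milestone_char_future
--                 )
--             else:
--                 specials[m] = milestone_char_passed if filled > m else milestone_char_future
--     tip = tip_char_overshoot if is_generally_overshooting_current_target else tip_char_normal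
--     if 0 <= filled < length:
--         specials[filled] = tip
--     elif filled == length and length > 0 and is_generally_overshooting_current_target:
--         specials[length - 1] = tip
--
--     # Emit the bar as runs between the (sorted) special positions: each base run
--     # is produced in one shot by string multiplication, with the number of filled
--     # cells in [a, b) computed arithmetically -- no per-position loop.
--     def run(a, b):
--         n_fill = max(0, min(filled, b) - a)
--         return char * n_fill + unfill_char * max(0, b - a - n_fill)
--
--     parts = []
--     prev = 0
--     for pos in sorted(specials):
--         parts.append(run(prev, pos))
--         parts.append(specials[pos])
--         prev = pos + 1
--     parts.append(run(prev, length))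
--     return "[" + "".join(parts) + "]"
-- ===== Notes on version B (the rewrite author's own statement) =====
-- stated objective: alternative
-- what changed: B never materialises or mutates a per-cell bar list: it collects position->char overrides (milestones, then tip) in a dict, sorts the override positions, and emits the bar as concatenated base runs built in one shot by string multiplication (the filled count of each run computed arithmetically) interleaved with the override chars.
import Mathlib
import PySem

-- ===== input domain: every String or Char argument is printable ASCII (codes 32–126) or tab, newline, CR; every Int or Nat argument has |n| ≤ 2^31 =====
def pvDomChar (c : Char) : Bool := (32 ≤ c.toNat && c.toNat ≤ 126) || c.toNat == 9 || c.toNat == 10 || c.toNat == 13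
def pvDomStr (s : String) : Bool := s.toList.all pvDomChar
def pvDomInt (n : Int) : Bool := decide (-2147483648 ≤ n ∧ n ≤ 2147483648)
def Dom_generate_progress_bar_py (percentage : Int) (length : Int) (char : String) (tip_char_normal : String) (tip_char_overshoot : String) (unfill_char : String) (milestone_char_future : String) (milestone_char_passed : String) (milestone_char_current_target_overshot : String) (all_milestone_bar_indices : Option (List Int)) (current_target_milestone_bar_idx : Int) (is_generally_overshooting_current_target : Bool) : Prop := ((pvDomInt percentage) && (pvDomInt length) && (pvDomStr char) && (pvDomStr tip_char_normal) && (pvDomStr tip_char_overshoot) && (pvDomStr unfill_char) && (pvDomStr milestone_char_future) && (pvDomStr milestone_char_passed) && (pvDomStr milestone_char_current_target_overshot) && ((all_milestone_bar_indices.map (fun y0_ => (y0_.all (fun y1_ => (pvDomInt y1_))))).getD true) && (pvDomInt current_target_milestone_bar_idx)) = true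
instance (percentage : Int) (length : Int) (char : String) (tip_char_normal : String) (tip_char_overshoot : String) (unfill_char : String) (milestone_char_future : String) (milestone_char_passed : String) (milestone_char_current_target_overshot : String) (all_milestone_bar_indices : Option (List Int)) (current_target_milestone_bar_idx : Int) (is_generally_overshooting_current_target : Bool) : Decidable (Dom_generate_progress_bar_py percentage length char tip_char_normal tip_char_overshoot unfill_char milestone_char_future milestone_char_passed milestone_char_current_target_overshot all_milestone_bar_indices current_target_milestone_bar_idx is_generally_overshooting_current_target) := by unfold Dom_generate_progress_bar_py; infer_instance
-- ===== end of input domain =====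

-- B never builds or mutates a per-cell bar list: it collects position→char overrides in a dict,
-- sorts the override positions, and emits the bar as base runs (built by string multiplication,
-- filled counts computed arithmetically) interleaved with the override chars; objective: alternative.
-- int(length*percentage/100) is ported as PySem.Int.truncdiv, exact on Dom (|length*percentage| < 2^53).

-- ===== PORT A =====
def generate_progress_bar_py (percentage : Int) (length : Int) (char : String) (tip_char_normal : String) (tip_char_overshoot : String) (unfill_char : String) (milestone_char_future : String) (milestone_char_passed : String) (milestone_char_current_target_overshot : String) (all_milestone_bar_indices : Option (List Int)) (current_target_milestone_bar_idx : Int) (is_generally_overshooting_current_target : Bool) : String :=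
  let p := max 0 (min 100 percentage)
  let filled_progress_length := PySem.Int.truncdiv (length * p) 100
  let bar_list : List String := List.replicate length.toNat unfill_char
  -- for i in range(filled_progress_length): if i < length: bar_list[i] = char
  let bar_list := (PySem.List.pyRange 0 filled_progress_length 1).foldl
      (fun b i => if i < length then PySem.List.pySetD b i char else b) bar_list
  let tip_to_use := if is_generally_overshooting_current_target then tip_char_overshoot else tip_char_normal
  -- tip placement, also yielding tip_pos
  let bt : List String × Int :=
    if 0 ≤ filled_progress_length ∧ filled_progress_length < length then
      (PySem.List.pySetD bar_list filled_progress_length tip_to_use, filled_progress_length)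
    else if filled_progress_length = length ∧ 0 < length then
      if is_generally_overshooting_current_target then
        (PySem.List.pySetD bar_list (length - 1) tip_to_use, length - 1)
      else (bar_list, -1)
    else (bar_list, -1)
  let bar_list := bt.1
  let tip_pos := bt.2
  -- if all_milestone_bar_indices: (Python truthiness: skips None and [])
  let bar_list :=
    match all_milestone_bar_indices with
    | none => bar_list
    | some ms =>
      if ms.isEmpty then bar_list
      else ms.foldl (fun b m =>
        if 0 ≤ m ∧ m < length then
          let chosen :=
            if m = current_target_milestone_bar_idx then
              (if filled_progress_length > m then milestone_char_current_target_overshot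
               else milestone_char_future)
            else if filled_progress_length > m then milestone_char_passed
            else milestone_char_future
          if m = tip_pos then b else PySem.List.pySetD b m chosen
        else b) bar_list
  "[" ++ PySem.Str.join "" bar_list ++ "]"

-- ===== PORT B =====
-- s * n (Python string repetition; exact: n ≤ 0 gives "")
def pvStrMul (s : String) (n : Int) : String := PySem.Str.join "" (List.replicate n.toNat s)

-- B's helper run(a, b): the base chars for positions a..b-1, built by string multiplication
def pvRun (filled : Int) (char unfill_char : String) (a b : Int) : String :=
  let n_fill := max 0 (min filled b - a)
  pvStrMul char n_fill ++ pvStrMul unfill_char (max 0 (b - a - n_fill))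

def generate_progress_bar_py_alt (percentage : Int) (length : Int) (char : String) (tip_char_normal : String) (tip_char_overshoot : String) (unfill_char : String) (milestone_char_future : String) (milestone_char_passed : String) (milestone_char_current_target_overshot : String) (all_milestone_bar_indices : Option (List Int)) (current_target_milestone_bar_idx : Int) (is_generally_overshooting_current_target : Bool) : String :=
  let p := max 0 (min 100 percentage)
  let filled := PySem.Int.truncdiv (length * p) 100
  -- specials: position -> char shown there; milestones first, then the tip overwrites
  let specials : PySem.Dict Int String :=
    (all_milestone_bar_indices.getD []).foldl (fun d m =>
      if 0 ≤ m ∧ m < length then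
        d.insert m
          (if m = current_target_milestone_bar_idx then
             (if filled > m then milestone_char_current_target_overshot else milestone_char_future)
           else if filled > m then milestone_char_passed
           else milestone_char_future)
      else d) PySem.Dict.empty
  let tip := if is_generally_overshooting_current_target then tip_char_overshoot else tip_char_normal
  let specials :=
    if 0 ≤ filled ∧ filled < length then specials.insert filled tip
    else if filled = length ∧ 0 < length ∧ is_generally_overshooting_current_target = true then
      specials.insert (length - 1) tip
    else specials
  -- emit base runs between sorted special positions, interleaved with the special chars
  let st := (PySem.List.sorted specials.keys (fun x => x) false).foldl
      (fun st pos =>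
        (st.1 ++ [pvRun filled char unfill_char st.2 pos] ++ [(specials.get? pos).getD ""], pos + 1))
      (([] : List String), (0 : Int))
  "[" ++ PySem.Str.join "" (st.1 ++ [pvRun filled char unfill_char st.2 length]) ++ "]"

-- ===== PRECONDITION & SPEC =====
def Spec_generate_progress_bar_py (percentage : Int) (length : Int) (char : String) (tip_char_normal : String) (tip_char_overshoot : String) (unfill_char : String) (milestone_char_future : String) (milestone_char_passed : String) (milestone_char_current_target_overshot : String) (all_milestone_bar_indices : Option (List Int)) (current_target_milestone_bar_idx : Int) (is_generally_overshooting_current_target : Bool) (out : String) : Prop := out = generate_progress_bar_py_alt percentage length char tip_char_normal tip_char_overshoot unfill_char milestone_char_future milestone_char_passed milestone_char_current_target_overshot all_milestone_bar_indices current_target_milestone_bar_idx is_generally_overshooting_current_target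
instance (percentage : Int) (length : Int) (char : String) (tip_char_normal : String) (tip_char_overshoot : String) (unfill_char : String) (milestone_char_future : String) (milestone_char_passed : String) (milestone_char_current_target_overshot : String) (all_milestone_bar_indices : Option (List Int)) (current_target_milestone_bar_idx : Int) (is_generally_overshooting_current_target : Bool) (out : String) : Decidable (Spec_generate_progress_bar_py percentage length char tip_char_normal tip_char_overshoot unfill_char milestone_char_future milestone_char_passed milestone_char_current_target_overshot all_milestone_bar_indices current_target_milestone_bar_idx is_generally_overshooting_current_target out) := by unfold Spec_generate_progress_bar_py; infer_instance

-- ===== CLAIM =====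
def Claim_equal_generate_progress_bar_py : Prop := ∀ (percentage : Int) (length : Int) (char : String) (tip_char_normal : String) (tip_char_overshoot : String) (unfill_char : String) (milestone_char_future : String) (milestone_char_passed : String) (milestone_char_current_target_overshot : String) (all_milestone_bar_indices : Option (List Int)) (current_target_milestone_bar_idx : Int) (is_generally_overshooting_current_target : Bool), Dom_generate_progress_bar_py percentage length char tip_char_normal tip_char_overshoot unfill_char milestone_char_future milestone_char_passed milestone_char_current_target_overshot all_milestone_bar_indices current_target_milestone_bar_idx is_generally_overshooting_current_target → Spec_generate_progress_bar_py percentage length char tip_char_normal tip_char_overshoot unfill_char milestone_char_future milestone_char_passed milestone_char_current_target_overshot all_milestone_bar_indices current_target_milestone_bar_idx is_generally_overshooting_current_target (generate_progress_bar_py percentage length char tip_char_normal tip_char_overshoot unfill_char milestone_char_future milestone_char_passed milestone_char_current_target_overshot all_milestone_bar_indices current_target_milestone_bar_idx is_generally_overshooting_current_target)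

-- ===== LEMMAS AND PROOFS =====

-- a fold whose step preserves list length preserves it overall
theorem pvFoldLen {α β : Type} (f : List β → α → List β) (h : ∀ b a, (f b a).length = b.length) :
    ∀ (L : List α) (b : List β), (L.foldl f b).length = b.length := by
  intro L
  induction L with
  | nil => intro b; rfl
  | cons x xs ih => intro b; simpa [List.foldl_cons, ih] using (ih (f b x)).trans (h b x)

-- characterization of A's fill loop (phase 1) via getElem?
theorem pvFillGet (length : Int) (c : String) (b : List String) (k j : Nat) :
    ((PySem.List.pyRange 0 (k : Int) 1).foldl
        (fun b i => if i < length then PySem.List.pySetD b i c else b) b)[j]?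
      = if j < k ∧ (j : Int) < length ∧ j < b.length then some c else b[j]? := by
  induction k generalizing b with
  | zero =>
    simp [PySem.List.pyRange_one_eq_nil]
  | succ k ih =>
    have h1 : ((k + 1 : Nat) : Int) = (k : Int) + 1 := by push_cast; ring
    rw [h1, PySem.List.pyRange_one_succ_right (by positivity), List.foldl_append]
    simp only [List.foldl_cons, List.foldl_nil]
    have hFlen : (List.foldl (fun b i => if i < length then PySem.List.pySetD b i c else b) b
        (PySem.List.pyRange 0 (k : Int) 1)).length = b.length := by
      rw [pvFoldLen]
      intro b' i; split
      · simp [PySem.List.length_pySetD]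
      · rfl
    by_cases hk : (k : Int) < length
    · rw [if_pos hk, PySem.List.pySetD_natCast, List.getElem?_set, ih, hFlen]
      by_cases hkj : k = j
      · subst hkj
        by_cases hjb : k < b.length
        · simp [hjb, hk]
        · have h2 : ¬ (k < k ∧ (k : Int) < length ∧ k < b.length) := by omega
          have h3 : ¬ (k < k + 1 ∧ (k : Int) < length ∧ k < b.length) := by
            intro h; exact hjb h.2.2
          rw [if_pos rfl, if_neg hjb, if_neg h3,
            List.getElem?_eq_none_iff.mpr (by omega)]
      · rw [if_neg hkj]
        have h4 : (j < k ∧ (j : Int) < length ∧ j < b.length)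
            ↔ (j < k + 1 ∧ (j : Int) < length ∧ j < b.length) := by
          constructor <;> intro h <;> exact ⟨by omega, h.2⟩
        rw [if_congr h4 rfl rfl]
    · rw [if_neg hk, ih]
      have h5 : (j < k ∧ (j : Int) < length ∧ j < b.length)
          ↔ (j < k + 1 ∧ (j : Int) < length ∧ j < b.length) := by
        constructor <;> intro h
        · exact ⟨by omega, h.2⟩
        · exact ⟨by omega, h.2⟩
      rw [if_congr h5 rfl rfl]

-- characterization of A's milestone overlay loop (phase 3) via getElem?
theorem pvMsGetA (length tip_pos ct filled : Int) (cf cp co : String)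
    (ms : List Int) (b : List String) (j : Nat) :
    (ms.foldl (fun b m =>
        if 0 ≤ m ∧ m < length then
          let chosen :=
            if m = ct then (if filled > m then co else cf)
            else if filled > m then cp else cf
          if m = tip_pos then b else PySem.List.pySetD b m chosen
        else b) b)[j]?
      = if (j : Int) ∈ ms ∧ (j : Int) < length ∧ (j : Int) ≠ tip_pos ∧ j < b.length then
          some (if (j : Int) = ct then (if filled > (j : Int) then co else cf)
                else if filled > (j : Int) then cp else cf)
        else b[j]? := by
  induction ms generalizing b with
  | nil => simp
  | cons m rest ih =>
    simp only [List.foldl_cons]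
    rw [ih]
    have hstep : (if 0 ≤ m ∧ m < length then
          (if m = tip_pos then b else PySem.List.pySetD b m
            (if m = ct then (if filled > m then co else cf)
             else if filled > m then cp else cf))
         else b).length = b.length := by
      split_ifs <;> simp [PySem.List.length_pySetD]
    rw [hstep]
    by_cases hmem : (j : Int) ∈ rest ∧ (j : Int) < length ∧ (j : Int) ≠ tip_pos ∧ j < b.length
    · have hc : (j : Int) ∈ m :: rest ∧ (j : Int) < length ∧ (j : Int) ≠ tip_pos ∧ j < b.length :=
        ⟨List.mem_cons_of_mem _ hmem.1, hmem.2⟩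
      rw [if_pos hmem, if_pos hc]
    · rw [if_neg hmem]
      by_cases hmj : m = (j : Int)
      · subst hmj
        by_cases hcond : 0 ≤ (j : Int) ∧ (j : Int) < length
        · rw [if_pos hcond]
          by_cases htp : (j : Int) = tip_pos
          · rw [if_pos htp, if_neg (fun h => h.2.2.1 htp)]
          · rw [if_neg htp,
              PySem.List.pySetD_of_nonneg _ _ hcond.1, List.getElem?_set]
            have hTo : ((j : Int)).toNat = j := by omega
            rw [hTo, if_pos rfl]
            by_cases hjb : j < b.length
            · have hc : (j : Int) ∈ (j : Int) :: rest ∧ (j : Int) < length ∧ (j : Int) ≠ tip_pos ∧ j < b.length :=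
                ⟨List.mem_cons_self, hcond.2, htp, hjb⟩
              rw [if_pos hjb, if_pos hc]
            · rw [if_neg hjb, if_neg (fun h => hjb h.2.2.2),
                List.getElem?_eq_none_iff.mpr (by omega)]
        · rw [if_neg hcond, if_neg (fun h => hcond ⟨by positivity, h.2.1⟩)]
      · have hstepj : (if 0 ≤ m ∧ m < length then
            (if m = tip_pos then b else PySem.List.pySetD b m
              (if m = ct then (if filled > m then co else cf)
               else if filled > m then cp else cf))
           else b)[j]? = b[j]? := by
          by_cases h1 : 0 ≤ m ∧ m < length
          · rw [if_pos h1]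
            by_cases h2 : m = tip_pos
            · rw [if_pos h2]
            · rw [if_neg h2, PySem.List.pySetD_of_nonneg _ _ h1.1,
                List.getElem?_set_ne (by omega)]
          · rw [if_neg h1]
        rw [hstepj]
        rw [if_neg (by
          intro h
          rcases List.mem_cons.mp h.1 with h1 | h1
          · exact hmj h1.symm
          · exact hmem ⟨h1, h.2⟩)]

-- characterization of B's milestone dict
theorem pvMsGetB (length ct filled : Int) (cf cp co : String)
    (ms : List Int) (d : PySem.Dict Int String) (j : Int) :
    (ms.foldl (fun d m =>
        if 0 ≤ m ∧ m < length then
          d.insert m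
            (if m = ct then (if filled > m then co else cf)
             else if filled > m then cp else cf)
        else d) d).get? j
      = if j ∈ ms ∧ 0 ≤ j ∧ j < length then
          some (if j = ct then (if filled > j then co else cf)
                else if filled > j then cp else cf)
        else d.get? j := by
  induction ms generalizing d with
  | nil => simp
  | cons m rest ih =>
    simp only [List.foldl_cons]
    rw [ih]
    by_cases hmem : j ∈ rest ∧ 0 ≤ j ∧ j < length
    · have hc : j ∈ m :: rest ∧ 0 ≤ j ∧ j < length := ⟨List.mem_cons_of_mem _ hmem.1, hmem.2⟩
      rw [if_pos hmem, if_pos hc]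
    · rw [if_neg hmem]
      by_cases hmj : m = j
      · subst hmj
        by_cases hcond : 0 ≤ m ∧ m < length
        · have hc : m ∈ m :: rest ∧ 0 ≤ m ∧ m < length := ⟨List.mem_cons_self, hcond⟩
          rw [if_pos hcond, PySem.Dict.get?_insert, if_pos rfl, if_pos hc]
        · rw [if_neg hcond, if_neg (fun h => hcond h.2)]
      · have hskip : (if 0 ≤ m ∧ m < length then
            d.insert m (if m = ct then (if filled > m then co else cf)
              else if filled > m then cp else cf) else d).get? j = d.get? j := by
          by_cases h1 : 0 ≤ m ∧ m < length
          · rw [if_pos h1, PySem.Dict.get?_insert, if_neg (fun h => hmj h.symm)]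
          · rw [if_neg h1]
        rw [hskip]
        rw [if_neg (by
          intro h
          rcases List.mem_cons.mp h.1 with h1 | h1
          · exact hmj h1.symm
          · exact hmem ⟨h1, h.2⟩)]

-- A's final bar list IS the per-position cell list over range(length)
theorem pvCell (length F ct tp : Int) (cc tip ucf mf mp mo : String) (ms : List Int)
    (bar2 : List String)
    (hb2len : bar2.length = length.toNat)
    (hb2 : ∀ j : Nat, bar2[j]? =
      if (j : Int) = tp ∧ j < length.toNat then some tip
      else if (j : Int) < F ∧ j < length.toNat then some cc
      else if j < length.toNat then some ucf else none) :
    (ms.foldl (fun b m =>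
        if 0 ≤ m ∧ m < length then
          let chosen := if m = ct then (if F > m then mo else mf)
            else if F > m then mp else mf
          if m = tp then b else PySem.List.pySetD b m chosen
        else b) bar2)
    = (PySem.List.pyRange 0 length 1).map (fun i =>
        if i = tp then tip
        else
          match (ms.foldl (fun d m =>
              if 0 ≤ m ∧ m < length then
                d.insert m (if m = ct then (if F > m then mo else mf)
                  else if F > m then mp else mf)
              else d) PySem.Dict.empty).get? i with
          | some c => c
          | none => if i < F then cc else ucf) := by
  apply List.ext_getElem?
  intro j
  rw [pvMsGetA, hb2len]
  by_cases hj : j < length.toNat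
  · have hjl : (j : Int) < length := by omega
    have hcastlen : length = ((length.toNat : Nat) : Int) := by omega
    rw [hcastlen, PySem.List.getElem?_map_pyRange_zero _ _ _ hj, ← hcastlen]
    rw [pvMsGetB]
    by_cases htpj : (j : Int) = tp
    · have hc : (j : Int) = tp ∧ j < length.toNat := ⟨htpj, hj⟩
      rw [if_neg (fun h => h.2.2.1 htpj), hb2, if_pos hc, if_pos htpj]
    · rw [if_neg htpj]
      by_cases hm : (j : Int) ∈ ms
      · have hcA : (j : Int) ∈ ms ∧ (j : Int) < length ∧ (j : Int) ≠ tp ∧ j < length.toNat :=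
          ⟨hm, hjl, htpj, hj⟩
        have hcB : (j : Int) ∈ ms ∧ 0 ≤ (j : Int) ∧ (j : Int) < length := ⟨hm, by omega, hjl⟩
        rw [if_pos hcA, if_pos hcB]
      · rw [if_neg (fun h => hm h.1), if_neg (fun h => hm h.1), hb2,
          if_neg (fun h => htpj h.1)]
        by_cases hf : (j : Int) < F
        · have hc : (j : Int) < F ∧ j < length.toNat := ⟨hf, hj⟩
          rw [if_pos hc]
          simp only [PySem.Dict.get?_empty]
          rw [if_pos hf]
        · rw [if_neg (fun h => hf h.1), if_pos hj]
          simp only [PySem.Dict.get?_empty]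
          rw [if_neg hf]
  · have h1 : (ms.foldl (fun b m =>
        if 0 ≤ m ∧ m < length then
          let chosen := if m = ct then (if F > m then mo else mf)
            else if F > m then mp else mf
          if m = tp then b else PySem.List.pySetD b m chosen
        else b) bar2).length = length.toNat := by
      rw [pvFoldLen _ (by
        intro b' m; dsimp only; split_ifs <;> simp [PySem.List.length_pySetD]), hb2len]
    rw [if_neg (fun h => hj h.2.2.2), hb2, if_neg (fun h => hj h.2), if_neg (fun h => hj h.2),
      if_neg hj]
    symm
    rw [List.getElem?_eq_none_iff, List.length_map, PySem.List.length_pyRange_one]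
    omega

-- A's whole bar (fill, tip placement, milestone overlay) equals the per-position cell list
theorem pvListEq (length F ct : Int) (cc tip ucf mf mp mo : String) (ov : Bool) (ms : List Int)
    (bar1 : List String)
    (hbar1 : bar1 = (PySem.List.pyRange 0 F 1).foldl
        (fun b i => if i < length then PySem.List.pySetD b i cc else b)
        (List.replicate length.toNat ucf))
    (bt : List String × Int)
    (hbt : bt = if 0 ≤ F ∧ F < length then (PySem.List.pySetD bar1 F tip, F)
      else if F = length ∧ 0 < length then
        if ov = true then (PySem.List.pySetD bar1 (length - 1) tip, length - 1)
        else (bar1, -1)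
      else (bar1, -1))
    (tpB : Int)
    (htpB : tpB = if 0 ≤ F ∧ F < length then F
      else if F = length ∧ 0 < length ∧ ov = true then length - 1 else -1) :
    ms.foldl (fun b m =>
        if 0 ≤ m ∧ m < length then
          let chosen := if m = ct then (if F > m then mo else mf) else if F > m then mp else mf
          if m = bt.2 then b else PySem.List.pySetD b m chosen
        else b) bt.1
    = (PySem.List.pyRange 0 length 1).map (fun i =>
        if i = tpB then tip
        else match (ms.foldl (fun d m =>
            if 0 ≤ m ∧ m < length then
              d.insert m (if m = ct then (if F > m then mo else mf) else if F > m then mp else mf)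
            else d) PySem.Dict.empty).get? i with
          | some c => c
          | none => if i < F then cc else ucf) := by
  have hbar1len : bar1.length = length.toNat := by
    rw [hbar1, pvFoldLen, List.length_replicate]
    intro b' i; split
    · simp [PySem.List.length_pySetD]
    · rfl
  have hbar1get : ∀ j : Nat, bar1[j]? =
      if (j : Int) < F ∧ j < length.toNat then some cc
      else if j < length.toNat then some ucf else none := by
    intro j
    by_cases hF0 : 0 ≤ F
    · rw [hbar1, show F = ((F.toNat : Nat) : Int) by omega, pvFillGet, List.length_replicate,
        List.getElem?_replicate]
      split_ifs <;> first | rfl | omega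
    · rw [hbar1, PySem.List.pyRange_one_eq_nil (by omega), List.foldl_nil,
        List.getElem?_replicate]
      split_ifs <;> first | rfl | omega
  by_cases c1 : 0 ≤ F ∧ F < length
  · have hbt' : bt = (PySem.List.pySetD bar1 F tip, F) := by rw [hbt, if_pos c1]
    have htpB' : tpB = F := by rw [htpB, if_pos c1]
    rw [hbt', htpB']
    refine pvCell length F ct F cc tip ucf mf mp mo ms _ ?_ ?_
    · rw [PySem.List.length_pySetD, hbar1len]
    · intro j
      rw [PySem.List.pySetD_of_nonneg _ _ c1.1, List.getElem?_set, hbar1len]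
      by_cases hjF : F.toNat = j
      · have h1 : F.toNat < length.toNat := by omega
        have h2 : (j : Int) = F ∧ j < length.toNat := by
          constructor <;> omega
        rw [if_pos hjF, if_pos h1, if_pos h2]
      · rw [if_neg hjF, hbar1get j,
          if_neg (by intro h; exact hjF (by omega) : ¬((j : Int) = F ∧ j < length.toNat))]
  · by_cases c2 : F = length ∧ 0 < length
    · by_cases hov : ov = true
      · have hbt' : bt = (PySem.List.pySetD bar1 (length - 1) tip, length - 1) := by
          rw [hbt, if_neg c1, if_pos c2, if_pos hov]
        have htpB' : tpB = length - 1 := by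
          rw [htpB, if_neg c1, if_pos ⟨c2.1, c2.2, hov⟩]
        rw [hbt', htpB']
        refine pvCell length F ct (length - 1) cc tip ucf mf mp mo ms _ ?_ ?_
        · rw [PySem.List.length_pySetD, hbar1len]
        · intro j
          rw [PySem.List.pySetD_of_nonneg _ _ (by omega : (0 : Int) ≤ length - 1),
            List.getElem?_set, hbar1len]
          by_cases hjF : (length - 1).toNat = j
          · have h1 : (length - 1).toNat < length.toNat := by omega
            have h2 : (j : Int) = length - 1 ∧ j < length.toNat := by
              constructor <;> omega
            rw [if_pos hjF, if_pos h1, if_pos h2]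
          · rw [if_neg hjF, hbar1get j,
              if_neg (by intro h; exact hjF (by omega) :
                ¬((j : Int) = length - 1 ∧ j < length.toNat))]
      · have hbt' : bt = (bar1, -1) := by rw [hbt, if_neg c1, if_pos c2, if_neg hov]
        have htpB' : tpB = -1 := by
          rw [htpB, if_neg c1, if_neg (fun h => hov h.2.2)]
        rw [hbt', htpB']
        refine pvCell length F ct (-1) cc tip ucf mf mp mo ms _ hbar1len ?_
        intro j
        rw [hbar1get j,
          if_neg (by intro h; omega : ¬((j : Int) = -1 ∧ j < length.toNat))]
    · have hbt' : bt = (bar1, -1) := by rw [hbt, if_neg c1, if_neg c2]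
      have htpB' : tpB = -1 := by
        rw [htpB, if_neg c1, if_neg (fun h => c2 ⟨h.1, h.2.1⟩)]
      rw [hbt', htpB']
      refine pvCell length F ct (-1) cc tip ucf mf mp mo ms _ hbar1len ?_
      intro j
      rw [hbar1get j,
        if_neg (by intro h; omega : ¬((j : Int) = -1 ∧ j < length.toNat))]

-- ---- B-side machinery: runs, joins, emission over sorted special positions ----

-- "".join with empty separator is flatten (of the char lists)
theorem pvInterNil : ∀ cs : List (List Char), PySem.Chars.join [] cs = cs.flatten := by
  intro cs
  induction cs with
  | nil => rfl
  | cons a r ih =>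
    cases r with
    | nil => rw [PySem.Chars.join_singleton]; simp
    | cons b r2 =>
      rw [PySem.Chars.join_cons_cons]
      simp only [List.flatten_cons]
      rw [ih]
      simp

theorem pvJoinTL (L : List String) :
    (PySem.Str.join "" L).toList = (L.map String.toList).flatten := by
  rw [PySem.Str.toList_join]
  exact pvInterNil _

theorem pvStrMulTL (s : String) (n : Int) :
    (pvStrMul s n).toList = (List.replicate n.toNat s.toList).flatten := by
  rw [pvStrMul, pvJoinTL, List.map_replicate]

-- run(a,b) is exactly the base cells of positions a..b-1
theorem pvRunTL (filled : Int) (cc ucf : String) :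
    ∀ (n : Nat) (a b : Int), (b - a).toNat = n →
    (pvRun filled cc ucf a b).toList
      = ((PySem.List.pyRange a b 1).map (fun i => (if i < filled then cc else ucf).toList)).flatten := by
  intro n
  induction n with
  | zero =>
    intro a b hn
    rw [PySem.List.pyRange_one_eq_nil (by omega)]
    simp only [List.map_nil, List.flatten_nil, pvRun, String.toList_append, pvStrMulTL]
    have h1 : (max 0 (min filled b - a)).toNat = 0 := by omega
    have h2 : (max 0 (b - a - max 0 (min filled b - a))).toNat = 0 := by omega
    rw [h1, h2]; simp
  | succ n ih =>
    intro a b hn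
    have hab : a < b := by omega
    rw [PySem.List.pyRange_one_cons hab]
    simp only [List.map_cons, List.flatten_cons]
    rw [← ih (a + 1) b (by omega)]
    simp only [pvRun, String.toList_append, pvStrMulTL]
    by_cases hf : a < filled
    · have hnf : (max 0 (min filled b - a)).toNat = (max 0 (min filled b - (a + 1))).toNat + 1 := by
        omega
      have hrest : (max 0 (b - a - max 0 (min filled b - a))).toNat
          = (max 0 (b - (a + 1) - max 0 (min filled b - (a + 1)))).toNat := by omega
      rw [hnf, hrest, List.replicate_succ, List.flatten_cons, if_pos hf]
      simp [List.append_assoc]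
    · have hnf : (max 0 (min filled b - a)).toNat = 0 := by omega
      have hnf' : (max 0 (min filled b - (a + 1))).toNat = 0 := by omega
      have hrest : (max 0 (b - a - max 0 (min filled b - a))).toNat
          = (max 0 (b - (a + 1) - max 0 (min filled b - (a + 1)))).toNat + 1 := by omega
      rw [hnf, hnf', hrest, List.replicate_succ, List.flatten_cons, if_neg hf]
      simp

-- the emission loop over the sorted special positions produces exactly the cell list
theorem pvEmit (d : PySem.Dict Int String) (filled length : Int) (cc ucf : String) :
    ∀ (ks : List Int) (parts : List String) (a0 : Int),
    ks.Pairwise (· < ·) →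
    (∀ k ∈ ks, a0 ≤ k ∧ k < length) →
    (∀ i : Int, a0 ≤ i → i < length → ((d.get? i).isSome = true ↔ i ∈ ks)) →
    (((ks.foldl (fun st pos =>
          (st.1 ++ [pvRun filled cc ucf st.2 pos] ++ [(d.get? pos).getD ""], pos + 1))
          (parts, a0)).1
        ++ [pvRun filled cc ucf
          ((ks.foldl (fun st pos =>
            (st.1 ++ [pvRun filled cc ucf st.2 pos] ++ [(d.get? pos).getD ""], pos + 1))
            (parts, a0)).2) length]).map String.toList).flatten
      = (parts.map String.toList).flatten
        ++ ((PySem.List.pyRange a0 length 1).map (fun i =>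
            (match d.get? i with
             | some c => c
             | none => if i < filled then cc else ucf).toList)).flatten := by
  intro ks
  induction ks with
  | nil =>
    intro parts a0 _ _ hmem
    simp only [List.foldl_nil, List.map_append, List.flatten_append]
    congr 1
    simp only [List.map_cons, List.map_nil, List.flatten_cons, List.flatten_nil, List.append_nil]
    rw [pvRunTL filled cc ucf (length - a0).toNat a0 length rfl]
    congr 1
    apply List.map_congr_left
    intro i hi
    have hi' := PySem.List.mem_pyRange_one.mp hi
    have hnone : d.get? i = none := by
      cases hd : d.get? i with
      | none => rfl
      | some v =>
        exact absurd ((hmem i hi'.1 hi'.2).mp (by rw [hd]; rfl)) (List.not_mem_nil)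
    rw [hnone]
  | cons k rest ih =>
    intro parts a0 hpw hbnd hmem
    have hk := hbnd k List.mem_cons_self
    have hv : ∃ v, d.get? k = some v := by
      have := (hmem k hk.1 hk.2).mpr List.mem_cons_self
      cases hd : d.get? k with
      | none => rw [hd] at this; simp at this
      | some v => exact ⟨v, rfl⟩
    obtain ⟨v, hv⟩ := hv
    simp only [List.foldl_cons]
    rw [ih (parts ++ [pvRun filled cc ucf a0 k] ++ [(d.get? k).getD ""]) (k + 1)
      (hpw.tail)
      (by
        intro k' hk'
        have h1 := (List.pairwise_cons.mp hpw).1 k' hk'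
        have h2 := hbnd k' (List.mem_cons_of_mem _ hk')
        exact ⟨by omega, h2.2⟩)
      (by
        intro i hi1 hi2
        rw [hmem i (by omega) hi2, List.mem_cons]
        constructor
        · rintro (h | h)
          · omega
          · exact h
        · intro h; exact Or.inr h)]
    rw [PySem.List.pyRange_one_append a0 k length hk.1 (by omega),
      PySem.List.pyRange_one_cons hk.2]
    simp only [List.map_append, List.flatten_append, List.map_cons, List.flatten_cons,
      List.map_nil, List.flatten_nil, List.append_nil, hv]
    have hfront : ((PySem.List.pyRange a0 k 1).map (fun i =>
        (match d.get? i with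
         | some c => c
         | none => if i < filled then cc else ucf).toList)).flatten
        = (pvRun filled cc ucf a0 k).toList := by
      rw [pvRunTL filled cc ucf (k - a0).toNat a0 k rfl]
      congr 1
      apply List.map_congr_left
      intro i hi
      have hi' := PySem.List.mem_pyRange_one.mp hi
      have hnone : d.get? i = none := by
        cases hd : d.get? i with
        | none => rfl
        | some w =>
          have hmemi := (hmem i hi'.1 (by omega)).mp (by rw [hd]; rfl)
          rcases List.mem_cons.mp hmemi with h | h
          · omega
          · have := (List.pairwise_cons.mp hpw).1 i h
            omega
      rw [hnone]
    rw [hfront]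
    simp [List.append_assoc]

-- ---- putting the two sides together ----

-- both bars, for a single milestone list ms (A's mutable-overlay bar vs B's sorted-run emission)
theorem pvMain (length F ct : Int) (char tip ucf mf mp mo : String) (ov : Bool) (ms : List Int)
    (bar1 : List String)
    (hbar1 : bar1 = (PySem.List.pyRange 0 F 1).foldl
        (fun b i => if i < length then PySem.List.pySetD b i char else b)
        (List.replicate length.toNat ucf))
    (bt : List String × Int)
    (hbt : bt = if 0 ≤ F ∧ F < length then (PySem.List.pySetD bar1 F tip, F)
      else if F = length ∧ 0 < length then
        if ov = true then (PySem.List.pySetD bar1 (length - 1) tip, length - 1)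
        else (bar1, -1)
      else (bar1, -1))
    (msd : PySem.Dict Int String)
    (hmsd : msd = ms.foldl (fun d m =>
        if 0 ≤ m ∧ m < length then
          d.insert m (if m = ct then (if F > m then mo else mf) else if F > m then mp else mf)
        else d) PySem.Dict.empty)
    (specials : PySem.Dict Int String)
    (hspec : specials =
      if 0 ≤ F ∧ F < length then msd.insert F tip
      else if F = length ∧ 0 < length ∧ ov = true then msd.insert (length - 1) tip
      else msd)
    (st : List String × Int)
    (hst : st = (PySem.List.sorted specials.keys (fun x => x) false).foldl
        (fun st pos =>
          (st.1 ++ [pvRun F char ucf st.2 pos] ++ [(specials.get? pos).getD ""], pos + 1))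
        (([] : List String), (0 : Int))) :
    "[" ++ PySem.Str.join "" (ms.foldl (fun b m =>
        if 0 ≤ m ∧ m < length then
          let chosen := if m = ct then (if F > m then mo else mf) else if F > m then mp else mf
          if m = bt.2 then b else PySem.List.pySetD b m chosen
        else b) bt.1) ++ "]"
    = "[" ++ PySem.Str.join "" (st.1 ++ [pvRun F char ucf st.2 length]) ++ "]" := by
  -- keys of specials are exactly the valid milestone indices plus (possibly) the tip position
  have hndmsd : msd.keys.Nodup := by
    rw [hmsd, PySem.List.foldl_ite_eq_foldl_filter]
    exact PySem.Dict.nodup_keys_foldl_insert _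
      (fun d m => if m = ct then (if F > m then mo else mf) else if F > m then mp else mf) _
      (by simp [PySem.Dict.keys_empty])
  have hbndmsd : ∀ k ∈ msd.keys, 0 ≤ k ∧ k < length := by
    intro k hk
    rw [hmsd, PySem.List.foldl_ite_eq_foldl_filter, PySem.Dict.keys_foldl_insert] at hk
    have hk2 : k ∈ ms.filter (fun m => decide (0 ≤ m ∧ m < length)) := by
      have := (PySem.Set.mem_update _ _ _).mp hk
      rcases this with h | h
      · simp [PySem.Dict.keys_empty] at h
      · exact h
    have := (List.mem_filter.mp hk2).2
    exact of_decide_eq_true this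
  have hndspec : specials.keys.Nodup := by
    rw [hspec]; split_ifs <;>
      first
        | exact PySem.Dict.nodup_keys_insert _ _ _ hndmsd
        | exact hndmsd
  have hbndspec : ∀ k ∈ specials.keys, 0 ≤ k ∧ k < length := by
    intro k hk
    rw [hspec] at hk
    split_ifs at hk with c1 c2
    · rcases (PySem.Dict.mem_keys_insert _ _ _ _).mp hk with h | h
      · subst h; exact ⟨c1.1, c1.2⟩
      · exact hbndmsd k h
    · rcases (PySem.Dict.mem_keys_insert _ _ _ _).mp hk with h | h
      · subst h; omega
      · exact hbndmsd k h
    · exact hbndmsd k hk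
  -- the sorted key list: strictly increasing, bounded, carrying exactly the overrides
  have hpw : (PySem.List.sorted specials.keys (fun x => x) false).Pairwise (· < ·) := by
    have hle := PySem.List.sorted_pairwise specials.keys (fun x => x)
    have hnd' : (PySem.List.sorted specials.keys (fun x => x) false).Nodup :=
      ((PySem.List.sorted_perm specials.keys (fun x => x) false).nodup_iff).mpr hndspec
    exact (hle.and hnd').imp (fun h => lt_of_le_of_ne h.1 h.2)
  have hbnd : ∀ k ∈ PySem.List.sorted specials.keys (fun x => x) false, 0 ≤ k ∧ k < length := by
    intro k hk
    exact hbndspec k ((PySem.List.mem_sorted _ _ _ _).mp hk)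
  have hmem : ∀ i : Int, 0 ≤ i → i < length →
      ((specials.get? i).isSome = true ↔ i ∈ PySem.List.sorted specials.keys (fun x => x) false) := by
    intro i _ _
    rw [PySem.List.mem_sorted]
    constructor
    · intro h
      by_contra hn
      rw [(PySem.Dict.get?_eq_none_iff_not_mem_keys _ _).mpr hn] at h
      simp at h
    · intro h
      cases hd : specials.get? i with
      | none => exact absurd ((PySem.Dict.get?_eq_none_iff_not_mem_keys _ _).mp hd) (not_not_intro h)
      | some v => rfl
  -- A's bar as the per-position cell list
  rw [pvListEq length F ct char tip ucf mf mp mo ov ms bar1 hbar1 bt hbt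
    (if 0 ≤ F ∧ F < length then F
     else if F = length ∧ 0 < length ∧ ov = true then length - 1 else -1) rfl]
  congr 1
  congr 1
  apply String.toList_inj.mp
  rw [pvJoinTL, pvJoinTL, List.map_map, hst,
    pvEmit specials F length char ucf (PySem.List.sorted specials.keys (fun x => x) false)
      [] 0 hpw hbnd hmem]
  simp only [List.map_nil, List.flatten_nil, List.nil_append]
  congr 1
  apply List.map_congr_left
  intro i hi
  have hi' := PySem.List.mem_pyRange_one.mp hi
  simp only [Function.comp_apply]
  congr 1
  rw [hspec, ← hmsd]
  by_cases c1 : 0 ≤ F ∧ F < length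
  · simp only [if_pos c1, PySem.Dict.get?_insert]
    by_cases hiF : i = F
    · simp [hiF]
    · simp [hiF]
  · simp only [if_neg c1]
    by_cases c2 : F = length ∧ 0 < length ∧ ov = true
    · simp only [if_pos c2, PySem.Dict.get?_insert]
      by_cases hiL : i = length - 1
      · simp [hiL]
      · simp [hiL]
    · simp only [if_neg c2, if_neg (show ¬ i = -1 by omega)]

-- ===== VERDICT =====
theorem generate_progress_bar_py_spec : Claim_equal_generate_progress_bar_py := by
  intro percentage length char tcn tco ucf mf mp mo amb ct ov _
  unfold Spec_generate_progress_bar_py generate_progress_bar_py generate_progress_bar_py_alt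
  dsimp only
  cases amb with
  | none =>
    exact pvMain length (PySem.Int.truncdiv (length * max 0 (min 100 percentage)) 100) ct
      char (if ov = true then tco else tcn) ucf mf mp mo ov [] _ rfl _ rfl _ rfl _ rfl _ rfl
  | some ms =>
    dsimp only
    by_cases hE : ms.isEmpty = true
    · have hms : ms = [] := List.isEmpty_iff.mp hE
      subst hms
      rw [if_pos hE]
      exact pvMain length (PySem.Int.truncdiv (length * max 0 (min 100 percentage)) 100) ct
        char (if ov = true then tco else tcn) ucf mf mp mo ov [] _ rfl _ rfl _ rfl _ rfl _ rfl
    · rw [if_neg hE]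
      exact pvMain length (PySem.Int.truncdiv (length * max 0 (min 100 percentage)) 100) ct
        char (if ov = true then tco else tcn) ucf mf mp mo ov ms _ rfl _ rfl _ rfl _ rfl _ rfl
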